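-- pv_equiv track=rewrite | github.com/LoveMyDouDou/MachineLearning | FeatureSelection/FSFOA/tools.py | index_replace
-- ===== SOURCE A (Python) =====
-- def index_replace(index,replaceString,constValue):
--     '''
--     在指定角标索引的位置将字符串进行替换
--     :param index: 替换字符的角标值
--     :param replaceString: 被替换的字符串
--     :param constValue: 替换的新字符
--     :return: 在给定位置替换新字符后的新字符串
--     '''
--     newString=''
--     for i in range(len(replaceString)):
--         if i!=index:
--             newString+=replaceString[i]
--         else:
--             newString+=str(constValue)
--     return newString
-- ===== SOURCE B (Python) =====
-- def index_replace(index, replaceString, constValue):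
--     '''Closed-form slicing instead of the char-by-char loop; same silent no-op for out-of-range index.'''
--     if not 0 <= index < len(replaceString):
--         return replaceString
--     return replaceString[:index] + str(constValue) + replaceString[index + 1:]
-- ===== Notes on version B (the rewrite author's own statement) =====
-- stated objective: faster
-- what changed: Replaced the character-by-character accumulation loop with a range guard plus closed-form slicing s[:index] + str(constValue) + s[index+1:].
import Mathlib
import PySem

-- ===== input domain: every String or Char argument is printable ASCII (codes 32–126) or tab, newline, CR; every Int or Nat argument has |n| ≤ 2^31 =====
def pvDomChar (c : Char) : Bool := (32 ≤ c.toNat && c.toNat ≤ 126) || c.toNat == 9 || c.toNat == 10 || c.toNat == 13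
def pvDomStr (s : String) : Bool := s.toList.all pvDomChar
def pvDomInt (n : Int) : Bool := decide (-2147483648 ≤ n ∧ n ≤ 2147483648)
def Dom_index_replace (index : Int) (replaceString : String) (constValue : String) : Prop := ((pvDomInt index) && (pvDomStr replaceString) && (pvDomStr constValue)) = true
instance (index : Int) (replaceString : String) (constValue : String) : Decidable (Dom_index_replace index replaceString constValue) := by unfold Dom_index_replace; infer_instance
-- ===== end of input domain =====

-- B replaces A's char-by-char accumulation loop with a range guard plus closed-form slicing (idiomatic).

-- ===== PORT A =====
-- 'for i in range(len(s)): if i != index: new += s[i] else: new += str(constValue)'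
-- ported as a fold over enumerate (index paired with the character it would fetch).
def index_replace (index : Int) (replaceString : String) (constValue : String) : String :=
  String.ofList ((PySem.List.enumerate replaceString.toList 0).foldl
    (fun acc p => if p.1 ≠ index then acc ++ [p.2] else acc ++ constValue.toList) [])

-- ===== PORT B =====
-- guard 'not 0 <= index < len(s)' then the slices s[:index] / s[index+1:] (take / drop on nonnegative bounds).
def index_replace_alt (index : Int) (replaceString : String) (constValue : String) : String :=
  if 0 ≤ index ∧ index < (replaceString.toList.length : Int) then
    String.ofList (replaceString.toList.take index.toNat ++ constValue.toList ++
               replaceString.toList.drop (index.toNat + 1))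
  else replaceString

-- ===== PRECONDITION & SPEC =====
def Spec_index_replace (index : Int) (replaceString : String) (constValue : String) (out : String) : Prop := out = index_replace_alt index replaceString constValue
instance (index : Int) (replaceString : String) (constValue : String) (out : String) : Decidable (Spec_index_replace index replaceString constValue out) := by unfold Spec_index_replace; infer_instance

-- ===== CLAIM (what is proved, stated in full; the proofs are below) =====
def Claim_equal_index_replace : Prop := ∀ (index : Int) (replaceString : String) (constValue : String), Dom_index_replace index replaceString constValue → Spec_index_replace index replaceString constValue (index_replace index replaceString constValue)

-- ===== LEMMAS AND PROOFS =====

-- the fold's branches both append on the right, so it is a flatMap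
lemma fold_eq_flatMap (xs : List (Int × Char)) (index : Int) (cv : List Char) (acc : List Char) :
    xs.foldl (fun acc p => if p.1 ≠ index then acc ++ [p.2] else acc ++ cv) acc
      = acc ++ xs.flatMap (fun p => if p.1 ≠ index then [p.2] else cv) := by
  have h : (fun (acc : List Char) (p : Int × Char) => if p.1 ≠ index then acc ++ [p.2] else acc ++ cv)
      = fun acc p => acc ++ (if p.1 ≠ index then [p.2] else cv) := by
    funext acc p; split <;> rfl
  rw [h, PySem.List.foldl_append_eq_flatMap]

-- characterisation of the flatMap over enumerate, for any start offset
lemma flatMap_enumerate (xs : List Char) (s index : Int) (cv : List Char) :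
    (PySem.List.enumerate xs s).flatMap (fun p => if p.1 ≠ index then [p.2] else cv)
      = if s ≤ index ∧ index < s + (xs.length : Int) then
          xs.take (index - s).toNat ++ cv ++ xs.drop ((index - s).toNat + 1)
        else xs := by
  induction xs generalizing s with
  | nil =>
    rw [if_neg (by simp only [List.length_nil, Nat.cast_zero, add_zero]; omega)]
    simp [PySem.List.enumerate_nil]
  | cons x xs ih =>
    rw [PySem.List.enumerate_cons]
    simp only [List.flatMap_cons, ih (s + 1), List.length_cons]
    push_cast
    by_cases hsi : s = index
    · subst hsi
      rw [if_neg (show ¬(s + 1 ≤ s ∧ s < s + 1 + (xs.length : Int)) by omega),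
          if_pos (show s ≤ s ∧ s < s + ((xs.length : Int) + 1) by omega)]
      simp
    · rw [if_pos hsi]
      by_cases hin : s + 1 ≤ index ∧ index < s + 1 + (xs.length : Int)
      · rw [if_pos hin, if_pos (show s ≤ index ∧ index < s + ((xs.length : Int) + 1) by omega)]
        have hk : (index - s).toNat = (index - (s + 1)).toNat + 1 := by omega
        simp [hk]
      · rw [if_neg hin, if_neg (show ¬(s ≤ index ∧ index < s + ((xs.length : Int) + 1)) by omega)]
        simp

-- ===== VERDICT (by name: the statement is the Claim_ definition above) =====
theorem index_replace_spec : Claim_equal_index_replace := by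
  intro index s cv _
  show index_replace index s cv = index_replace_alt index s cv
  unfold index_replace index_replace_alt
  rw [fold_eq_flatMap, flatMap_enumerate]
  simp only [List.nil_append, zero_add, sub_zero]
  by_cases h : 0 ≤ index ∧ index < (s.toList.length : Int)
  · rw [if_pos h, if_pos h]
  · rw [if_neg h, if_neg h, String.ofList_toList]
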